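-- pv_equiv track=rewrite | github.com/TDA-TPs/TP1 | tp1.py | tie_break_candidates
-- ===== SOURCE A (Python) =====
-- def tie_break_candidates(transactions_candidates):
--     '''
--     Given a list of transactions candidates, it returns the one with the smallest finish time
--
--     Args:
--         - transactions_candidates: list of tuples (transaction, index).
--     E.g. [((1, 2, 3, (2, 1)), 0), ((2, 3, 4, (2, 1)), 1), ...]
--
--     Returns:
--         - The transaction with the smallest finish time and its index.
--     E.g. ((1, 2, 3, (2, 1)), 0)
--     '''
--     first_to_finish = transactions_candidates[0][0][2]
--     first_to_finish_transaction = transactions_candidates[0]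
--     for i in range(len(transactions_candidates)):
--         actual_transaction_finish_time = transactions_candidates[i][0][2]
--         if actual_transaction_finish_time < first_to_finish:
--             first_to_finish = actual_transaction_finish_time
--             first_to_finish_transaction = transactions_candidates[i]
--     return first_to_finish_transaction[0][3], first_to_finish_transaction[1]
-- ===== SOURCE B (Python) =====
-- def tie_break_candidates(transactions_candidates):
--     '''Stable-sort by finish time and take the head; same result as A's min-scan.'''
--     ordered = sorted(transactions_candidates, key=lambda t: t[0][2])
--     best = ordered[0]
--     return best[0][3], best[1]
-- ===== Notes on version B (the rewrite author's own statement) =====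
-- stated objective: idiomatic
-- what changed: Replaces the manual index loop with a running strict minimum by a stable sort on finish time followed by taking the head (stability makes the head exactly the first minimum A keeps).
import Mathlib
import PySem

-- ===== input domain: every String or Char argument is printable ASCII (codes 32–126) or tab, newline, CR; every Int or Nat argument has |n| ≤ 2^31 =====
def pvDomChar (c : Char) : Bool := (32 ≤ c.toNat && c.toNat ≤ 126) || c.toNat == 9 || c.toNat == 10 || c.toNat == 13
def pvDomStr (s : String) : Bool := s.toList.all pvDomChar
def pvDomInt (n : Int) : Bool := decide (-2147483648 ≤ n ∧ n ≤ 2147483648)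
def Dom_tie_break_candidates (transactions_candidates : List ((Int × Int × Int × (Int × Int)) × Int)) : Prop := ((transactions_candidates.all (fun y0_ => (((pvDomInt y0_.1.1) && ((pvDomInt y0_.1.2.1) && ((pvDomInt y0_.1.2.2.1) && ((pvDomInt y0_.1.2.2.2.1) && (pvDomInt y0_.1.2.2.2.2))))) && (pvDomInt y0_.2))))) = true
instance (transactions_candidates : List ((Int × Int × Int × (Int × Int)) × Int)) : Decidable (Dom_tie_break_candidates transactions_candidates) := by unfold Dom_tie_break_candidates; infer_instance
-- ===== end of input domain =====

-- B replaces A's index-loop min-scan by a stable sort on finish time followed by taking the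
-- first element; same return value (idiomatic decomposition, not claimed faster).

-- A transaction candidate: ((start?, ?, finish, (a, b)), index)
def pvDefault : (Int × Int × Int × (Int × Int)) × Int := ((0, 0, 0, (0, 0)), 0)

-- ===== PORT A =====
def tie_break_candidates (transactions_candidates : List ((Int × Int × Int × (Int × Int)) × Int)) : (Int × Int) × Int :=
  -- first_to_finish = transactions_candidates[0][0][2]; first_to_finish_transaction = transactions_candidates[0]
  let init : Int × ((Int × Int × Int × (Int × Int)) × Int) :=
    ((PySem.List.pyGetD transactions_candidates 0 pvDefault).1.2.2.1,
     PySem.List.pyGetD transactions_candidates 0 pvDefault)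
  -- for i in range(len(...)): if tc[i][0][2] < first_to_finish: update both
  let s := (PySem.List.pyRange 0 transactions_candidates.length 1).foldl
    (fun s i =>
      if (PySem.List.pyGetD transactions_candidates i pvDefault).1.2.2.1 < s.1
      then ((PySem.List.pyGetD transactions_candidates i pvDefault).1.2.2.1,
            PySem.List.pyGetD transactions_candidates i pvDefault)
      else s)
    init
  -- return first_to_finish_transaction[0][3], first_to_finish_transaction[1]
  (s.2.1.2.2.2, s.2.2)

-- ===== PORT B =====
def tie_break_candidates_alt (transactions_candidates : List ((Int × Int × Int × (Int × Int)) × Int)) : (Int × Int) × Int :=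
  let ordered := PySem.List.sorted transactions_candidates (fun t => t.1.2.2.1) false
  let best := PySem.List.pyGetD ordered 0 pvDefault
  (best.1.2.2.2, best.2)

-- ===== PRECONDITION & SPEC =====
-- A (and B) index element 0: the empty list raises IndexError, so it is excluded.
def Pre_tie_break_candidates (transactions_candidates : List ((Int × Int × Int × (Int × Int)) × Int)) : Prop :=
  transactions_candidates ≠ []
instance (transactions_candidates : List ((Int × Int × Int × (Int × Int)) × Int)) : Decidable (Pre_tie_break_candidates transactions_candidates) := by unfold Pre_tie_break_candidates; infer_instance

def pvWitness_tie_break_candidates : (List ((Int × Int × Int × (Int × Int)) × Int)) :=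
  [((1, 2, 3, (2, 1)), 0), ((2, 3, 1, (5, 6)), 1), ((0, 0, 1, (7, 8)), 2)]

def Spec_tie_break_candidates (transactions_candidates : List ((Int × Int × Int × (Int × Int)) × Int)) (out : (Int × Int) × Int) : Prop := out = tie_break_candidates_alt transactions_candidates
instance (transactions_candidates : List ((Int × Int × Int × (Int × Int)) × Int)) (out : (Int × Int) × Int) : Decidable (Spec_tie_break_candidates transactions_candidates out) := by unfold Spec_tie_break_candidates; infer_instance

-- ===== CLAIM (what is proved, stated in full; the proofs are below) =====
def Claim_equal_tie_break_candidates : Prop := ∀ (transactions_candidates : List ((Int × Int × Int × (Int × Int)) × Int)), Dom_tie_break_candidates transactions_candidates → Pre_tie_break_candidates transactions_candidates → Spec_tie_break_candidates transactions_candidates (tie_break_candidates transactions_candidates)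

-- ===== LEMMAS AND PROOFS =====

-- the finish-time key
def pvKey (t : (Int × Int × Int × (Int × Int)) × Int) : Int := t.1.2.2.1

-- A's loop body as a step on the (min, winner) state
def pvStep (s : Int × ((Int × Int × Int × (Int × Int)) × Int))
    (t : (Int × Int × Int × (Int × Int)) × Int) :
    Int × ((Int × Int × Int × (Int × Int)) × Int) :=
  if pvKey t < s.1 then (pvKey t, t) else s

-- appending one element to the scanned list applies one step
lemma pvScan_append (xs : List ((Int × Int × Int × (Int × Int)) × Int)) (x : _) (init : _) :
    (xs ++ [x]).foldl pvStep init = pvStep (xs.foldl pvStep init) x := by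
  simp [List.foldl_append]

-- sorting with one more element at the end inserts it into the sorted list
lemma pvSorted_append (xs : List ((Int × Int × Int × (Int × Int)) × Int)) (x : _) :
    PySem.List.sorted (xs ++ [x]) pvKey false =
      PySem.List.insertBy (fun a b => decide (pvKey a < pvKey b)) x
        (PySem.List.sorted xs pvKey false) := by
  rw [PySem.List.sorted_eq_foldl_insertBy, PySem.List.sorted_eq_foldl_insertBy,
    List.foldl_append]
  rfl

-- core invariant: the scan's winner state is (key m, m) for m the head of the stable sort
lemma pvScan_eq_sorted_head (h : _) (xs : List ((Int × Int × Int × (Int × Int)) × Int)) :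
    ∃ m t, PySem.List.sorted (h :: xs) pvKey false = m :: t ∧
      (h :: xs).foldl pvStep (pvKey h, h) = (pvKey m, m) := by
  induction xs using List.reverseRecOn with
  | nil =>
    exact ⟨h, [], rfl, by simp [pvStep]⟩
  | append_singleton xs x ih =>
    obtain ⟨m, t, hs, hf⟩ := ih
    rw [show h :: (xs ++ [x]) = (h :: xs) ++ [x] by simp, pvScan_append, hf,
      pvSorted_append, hs]
    by_cases hlt : pvKey x < pvKey m
    · exact ⟨x, m :: t, by simp [PySem.List.insertBy, hlt], by simp [pvStep, hlt]⟩
    · exact ⟨m, PySem.List.insertBy (fun a b => decide (pvKey a < pvKey b)) x t,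
        by simp [PySem.List.insertBy, hlt], by simp [pvStep, hlt]⟩

-- ===== VERDICT (by name: the statement is the Claim_ definition above) =====
theorem tie_break_candidates_spec : Claim_equal_tie_break_candidates := by
  intro tc _ hpre
  obtain ⟨h, xs, rfl⟩ := List.exists_cons_of_ne_nil hpre
  obtain ⟨m, t, hs, hf⟩ := pvScan_eq_sorted_head h xs
  show _ = tie_break_candidates_alt _
  unfold tie_break_candidates tie_break_candidates_alt
  dsimp only
  rw [PySem.List.foldl_pyRange_zero_pyGetD' (h :: xs) pvDefault
    (fun s t => if t.1.2.2.1 < s.1 then (t.1.2.2.1, t) else s)]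
  simp only [PySem.List.pyGetD_zero_cons]
  have : (h :: xs).foldl
      (fun s t => if t.1.2.2.1 < s.1 then (t.1.2.2.1, t) else s) (h.1.2.2.1, h)
      = (pvKey m, m) := hf
  rw [this, show (fun t : (Int × Int × Int × (Int × Int)) × Int => t.1.2.2.1) = pvKey from rfl,
    hs]
  simp [PySem.List.pyGetD_zero_cons]
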